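-- pv_equiv track=rewrite | github.com/Aryudesu/AryuMath | aryuMath.py | bernoulli_q
-- ===== SOURCE A (Python) =====
-- import math
--
-- def binomial_coefficients(a, b):
--     """Get binomial coefficients aCb"""
--     n, m = a, b
--     if n < 2 * m:
--         m = n - m
--     if n == m or m == 0:
--         return 1
--     tmp = [n - i for i in range(m)]
--     for i in range(1, m + 1):
--         for j in range(m):
--             if not tmp[j] % i:
--                 tmp[j] //= i
--                 break
--     result = 1
--     for i in tmp:
--         result *= i
--     return result
--
-- def bernoulli_q(num):
--     """calc Bernoulli Number In Q on 0 ~ N"""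
--     res = [[1, 1]]
--     for i in range(1, num + 1):
--         numer, denom = res[0][0] * binomial_coefficients(i + 1, 0), res[0][1]
--         for j in range(1, i):
--             numer = numer * res[j][1] + denom * res[j][0] * binomial_coefficients(
--                 i + 1, j
--             )
--             denom = denom * res[j][1]
--             if numer:
--                 g = math.gcd(numer, denom)
--                 numer //= g
--                 denom //= g
--         numer *= -1
--         denom *= i + 1
--         if (numer < 0 and denom < 0) or (numer > 0 and denom < 0):
--             numer = -numer
--             denom = -denom
--         if not numer:
--             denom = 1
--         else:
--             g = math.gcd(abs(numer), abs(denom))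
--             numer //= g
--             denom //= g
--         res.append([numer, denom])
--     return res
-- ===== SOURCE B (Python) =====
-- import math
--
-- def _binom_like(n, b):
--     """Same value as A's quirky division-based helper (observable behaviour; it
--     differs from C(n,k) for n >= 12), computed by tracking per-position
--     accumulated divisors instead of mutating the quotients: divs[j] is the
--     product of the trial divisors applied at position j, the current quotient
--     being (n - j) // divs[j]."""
--     m = n - b if n < 2 * b else b
--     if n == m or m == 0:
--         return 1
--     divs = [1] * m
--     for i in range(1, m + 1):
--         for j in range(m):
--             if (n - j) % (divs[j] * i) == 0:
--                 divs[j] *= i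
--                 break
--     r = 1
--     for j in range(m):
--         r *= (n - j) // divs[j]
--     return r
--
-- def bernoulli_q(num):
--     res = [[1, 1]]
--     for i in range(1, num + 1):
--         # one common denominator: the product of all previous denominators
--         D = 1
--         for j in range(i):
--             D *= res[j][1]
--         # the helper's value depends only on min(j, i+1-j): compute each once per row
--         half = [_binom_like(i + 1, k) for k in range((i + 1) // 2 + 1)]
--         s = 0
--         for j in range(i):
--             s += half[min(j, i + 1 - j)] * res[j][0] * (D // res[j][1])
--         # B_i = -s / (D * (i+1)), reduced once; gcd(0, d) = d gives [0, 1]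
--         n, d = -s, D * (i + 1)
--         g = math.gcd(n, d)
--         res.append([n // g, d // g])
--     return res
-- ===== Notes on version B (the rewrite author's own statement) =====
-- stated objective: alternative
-- what changed: B sums each Bernoulli row over one common denominator (the product of all previous denominators) with a single final gcd normalization instead of A's per-term gcd reductions, negation and sign/zero special cases; it computes A's quirky division-based binomial (observable behaviour: it differs from C(n,k) for n >= 12) by tracking per-position accumulated divisors over the untouched original values instead of mutating a list of quotients, and exploits that helper's min(j, n-j) symmetry to compute each row's coefficients once per mirror pair.
import Mathlib
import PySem

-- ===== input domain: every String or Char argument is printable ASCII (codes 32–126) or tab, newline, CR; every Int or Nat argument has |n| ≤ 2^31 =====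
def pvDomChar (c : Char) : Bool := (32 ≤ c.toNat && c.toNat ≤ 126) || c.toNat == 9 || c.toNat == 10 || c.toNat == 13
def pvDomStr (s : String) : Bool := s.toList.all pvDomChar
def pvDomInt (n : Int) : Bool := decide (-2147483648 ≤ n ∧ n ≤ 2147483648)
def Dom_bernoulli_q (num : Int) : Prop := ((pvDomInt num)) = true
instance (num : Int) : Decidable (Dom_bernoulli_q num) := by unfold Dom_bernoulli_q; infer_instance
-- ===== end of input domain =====

-- B sums each Bernoulli row over one common denominator (product of the previous denominators)
-- with a single final gcd normalization instead of A's per-term gcd reductions and sign/zero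
-- special cases, and computes A's quirky division-based binomial (observable behaviour: it
-- differs from C(n,k) for n ≥ 12) by tracking per-position accumulated divisors over the
-- untouched original values instead of mutating a list of quotients. Objective: alternative.

-- ===== PORT A =====
-- inner loop 'for j in range(m): if tmp[j] % i == 0: tmp[j] //= i; break'
-- (pyGetD's default 0 is unreachable: every scanned index is in range)
def pvAInner (i : Int) (tmp : List Int) : List Int → List Int
  | [] => tmp
  | j :: js =>
    if PySem.Int.mod (PySem.List.pyGetD tmp j 0) i = 0 then
      PySem.List.pySetD tmp j (PySem.Int.floordiv (PySem.List.pyGetD tmp j 0) i)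
    else pvAInner i tmp js

def binomial_coefficients (a b : Int) : Int :=
  let n := a
  let m := if a < 2 * b then a - b else b
  if n = m ∨ m = 0 then 1
  else
    ((PySem.List.pyRange 1 (m + 1) 1).foldl
      (fun tmp i => pvAInner i tmp (PySem.List.pyRange 0 m 1))
      ((PySem.List.pyRange 0 m 1).map (fun i => n - i))).foldl
      (fun result i => result * i) 1

-- body of A's inner loop over j (math.gcd x y = Int.gcd x y)
def pvAIn (res : List (List Int)) (i : Int) (p : Int × Int) (j : Int) : Int × Int :=
  let numer := p.1 * (PySem.List.pyGetD (PySem.List.pyGetD res j []) 1 0) +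
    p.2 * (PySem.List.pyGetD (PySem.List.pyGetD res j []) 0 0) * binomial_coefficients (i + 1) j
  let denom := p.2 * (PySem.List.pyGetD (PySem.List.pyGetD res j []) 1 0)
  if numer ≠ 0 then
    (PySem.Int.floordiv numer (Int.gcd numer denom), PySem.Int.floordiv denom (Int.gcd numer denom))
  else (numer, denom)

-- the tail of A's loop body: numer *= -1; denom *= i+1; sign fix; zero/gcd normalization
def pvASign (i : Int) (p : Int × Int) : Int × Int :=
  match p with
  | (p1, p2) =>
    if (p1 * (-1) < 0 ∧ p2 * (i + 1) < 0) ∨ (p1 * (-1) > 0 ∧ p2 * (i + 1) < 0) then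
      (-(p1 * (-1)), -(p2 * (i + 1)))
    else (p1 * (-1), p2 * (i + 1))

def pvAFinish2 (q : Int × Int) : List Int :=
  match q with
  | (numer, denom) =>
    if numer = 0 then [numer, 1]
    else [PySem.Int.floordiv numer (Int.gcd |numer| |denom|),
          PySem.Int.floordiv denom (Int.gcd |numer| |denom|)]

def pvAFinish (i : Int) (p : Int × Int) : List Int := pvAFinish2 (pvASign i p)

-- body of A's outer loop (lists indexed with pyGetD; the defaults are unreachable)
def pvAStep (res : List (List Int)) (i : Int) : List (List Int) :=
  res ++ [pvAFinish i ((PySem.List.pyRange 1 i 1).foldl (pvAIn res i)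
    ((PySem.List.pyGetD (PySem.List.pyGetD res 0 []) 0 0) * binomial_coefficients (i + 1) 0,
     PySem.List.pyGetD (PySem.List.pyGetD res 0 []) 1 0))]

def bernoulli_q (num : Int) : List (List Int) :=
  (PySem.List.pyRange 1 (num + 1) 1).foldl pvAStep [[1, 1]]

-- ===== PORT B =====
-- inner loop 'for j in range(m): if (n - j) % (divs[j] * i) == 0: divs[j] *= i; break'
def pvBInner (n i : Int) (divs : List Int) : List Int → List Int
  | [] => divs
  | j :: js =>
    if PySem.Int.mod (n - j) (PySem.List.pyGetD divs j 0 * i) = 0 then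
      PySem.List.pySetD divs j (PySem.List.pyGetD divs j 0 * i)
    else pvBInner n i divs js

def pvBinomLike (n b : Int) : Int :=
  let m := if n < 2 * b then n - b else b
  if n = m ∨ m = 0 then 1
  else
    -- divs = [1] * m; then the divisor loop; then r = prod of (n - j) // divs[j]
    let divsF := (PySem.List.pyRange 1 (m + 1) 1).foldl
      (fun ds i => pvBInner n i ds (PySem.List.pyRange 0 m 1))
      ((PySem.List.pyRange 0 m 1).map (fun _ => (1 : Int)))
    (PySem.List.pyRange 0 m 1).foldl
      (fun r j => r * PySem.Int.floordiv (n - j) (PySem.List.pyGetD divsF j 0)) 1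

-- res[j][0] and res[j][1]
def pvBN (res : List (List Int)) (j : Int) : Int :=
  PySem.List.pyGetD (PySem.List.pyGetD res j []) 0 0
def pvBD (res : List (List Int)) (j : Int) : Int :=
  PySem.List.pyGetD (PySem.List.pyGetD res j []) 1 0

-- 'n, d = -s, D*(i+1); g = math.gcd(n, d); res.append([n//g, d//g])'
def pvBFinish (i : Int) (p : Int × Int) : List Int :=
  [PySem.Int.floordiv (-p.1) (Int.gcd (-p.1) (p.2 * (i + 1))),
   PySem.Int.floordiv (p.2 * (i + 1)) (Int.gcd (-p.1) (p.2 * (i + 1)))]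

-- body of B's outer loop: D = prod of previous denominators, half = the row's helper values
-- (one per mirror pair, '[_binom_like(i+1,k) for k in range((i+1)//2+1)]'), s = the sum
def pvBStep (res : List (List Int)) (i : Int) : List (List Int) :=
  let D := (PySem.List.pyRange 0 i 1).foldl (fun p j => p * pvBD res j) 1
  let half := (PySem.List.pyRange 0 (PySem.Int.floordiv (i + 1) 2 + 1) 1).map
    (fun k => pvBinomLike (i + 1) k)
  let s := (PySem.List.pyRange 0 i 1).foldl
    (fun a j => a + PySem.List.pyGetD half (min j (i + 1 - j)) 0 * pvBN res j *
      PySem.Int.floordiv D (pvBD res j)) 0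
  res ++ [pvBFinish i (s, D)]

def bernoulli_q_alt (num : Int) : List (List Int) :=
  (PySem.List.pyRange 1 (num + 1) 1).foldl pvBStep [[1, 1]]

-- ===== PRECONDITION & SPEC =====
def Spec_bernoulli_q (num : Int) (out : List (List Int)) : Prop := out = bernoulli_q_alt num
instance (num : Int) (out : List (List Int)) : Decidable (Spec_bernoulli_q num out) := by unfold Spec_bernoulli_q; infer_instance

-- ===== CLAIM (what is proved, stated in full; the proofs are below) =====
def Claim_equal_bernoulli_q : Prop := ∀ (num : Int), Dom_bernoulli_q num → Spec_bernoulli_q num (bernoulli_q num)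

-- ===== LEMMAS AND PROOFS =====

lemma pyGetD_pair_zero (x y d : Int) : PySem.List.pyGetD [x, y] 0 d = x := rfl
lemma pyGetD_pair_one (x y d : Int) : PySem.List.pyGetD [x, y] 1 d = y := rfl

-- ---- exact-division facts ----
lemma gcd_cast_pos {n d : Int} (hd : 0 < d) : 0 < ((Int.gcd n d : Nat) : Int) := by
  have h : Int.gcd n d ≠ 0 := by
    intro h0
    have := Int.eq_zero_of_gcd_eq_zero_right h0
    omega
  omega

lemma floordiv_exact {a b : Int} (hb : 0 < b) (h : b ∣ a) :
    PySem.Int.floordiv a b * b = a := by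
  rw [PySem.Int.floordiv_eq_ediv_of_pos hb]
  exact Int.ediv_mul_cancel h

lemma canon_den_pos {n d : Int} (hd : 0 < d) :
    0 < PySem.Int.floordiv d (Int.gcd n d) := by
  have hg := gcd_cast_pos (n := n) hd
  have hmul := floordiv_exact hg (Int.gcd_dvd_right n d)
  nlinarith [hmul, hg, hd]

-- ---- helper equivalence: A's quotient list vs B's divisor list, lockstep ----

-- the relation between A's state tmp and B's state divs
def pvRel (n : Int) (tmp divs : List Int) : Prop :=
  tmp.length = divs.length ∧
  ∀ k : Nat, (hk : k < tmp.length) → (hk' : k < divs.length) →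
    tmp[k] * divs[k] = n - k ∧ 0 < divs[k]

lemma pvScan_step (n i : Int) (hi : 0 < i) : ∀ (js : List Int) (tmp divs : List Int),
    pvRel n tmp divs → (∀ j ∈ js, 0 ≤ j ∧ j < (tmp.length : Int)) →
    pvRel n (pvAInner i tmp js) (pvBInner n i divs js) := by
  intro js
  induction js with
  | nil => intro tmp divs h _; exact h
  | cons j t ih =>
    intro tmp divs hrel hjs
    obtain ⟨hj0, hjlt⟩ := hjs j (List.mem_cons_self)
    obtain ⟨hlenR, hpt⟩ := hrel
    have hjn : j.toNat < tmp.length := by omega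
    have hjn' : j.toNat < divs.length := by omega
    have hjlt' : j < (divs.length : Int) := by omega
    have hcast : ((j.toNat : Nat) : Int) = j := Int.toNat_of_nonneg hj0
    have hgA : PySem.List.pyGetD tmp j 0 = tmp[j.toNat] :=
      PySem.List.pyGetD_eq_getElem tmp 0 hj0 hjlt
    have hgB : PySem.List.pyGetD divs j 0 = divs[j.toNat] :=
      PySem.List.pyGetD_eq_getElem divs 0 hj0 hjlt'
    obtain ⟨hprod, hdpos⟩ := hpt j.toNat hjn hjn'
    have hnj : n - j = tmp[j.toNat] * divs[j.toNat] := by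
      rw [hprod, hcast]
    have hiff : PySem.Int.mod (PySem.List.pyGetD tmp j 0) i = 0 ↔
        PySem.Int.mod (n - j) (PySem.List.pyGetD divs j 0 * i) = 0 := by
      rw [hgA, hgB, PySem.Int.mod_eq_zero_iff_dvd, PySem.Int.mod_eq_zero_iff_dvd, hnj,
        mul_comm (tmp[j.toNat]) (divs[j.toNat])]
      exact (mul_dvd_mul_iff_left (show divs[j.toNat] ≠ 0 by omega)).symm
    simp only [pvAInner, pvBInner]
    by_cases hc : PySem.Int.mod (PySem.List.pyGetD tmp j 0) i = 0
    · rw [if_pos hc, if_pos (hiff.mp hc)]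
      have hdvd : i ∣ tmp[j.toNat] := by
        rw [hgA, PySem.Int.mod_eq_zero_iff_dvd] at hc
        exact hc
      have hx : PySem.Int.floordiv (PySem.List.pyGetD tmp j 0) i * i = tmp[j.toNat] := by
        rw [hgA]
        exact floordiv_exact hi hdvd
      rw [PySem.List.pySetD_of_nonneg _ _ hj0, PySem.List.pySetD_of_nonneg _ _ hj0]
      constructor
      · simp [hlenR]
      · intro k hk hk'
        simp only [List.length_set] at hk hk'
        by_cases hkj : k = j.toNat
        · subst hkj
          rw [List.getElem_set_self, List.getElem_set_self]
          constructor
          · rw [hgB]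
            linear_combination divs[j.toNat] * hx + hprod
          · rw [hgB]
            positivity
        · rw [List.getElem_set_ne (by omega), List.getElem_set_ne (by omega)]
          exact hpt k hk hk'
    · rw [if_neg hc, if_neg (fun hb => hc (hiff.mpr hb))]
      exact ih tmp divs ⟨hlenR, hpt⟩ (fun x hx => hjs x (List.mem_cons_of_mem _ hx))

lemma len_pvAInner (i : Int) : ∀ (js tmp : List Int), (pvAInner i tmp js).length = tmp.length := by
  intro js
  induction js with
  | nil => intro tmp; rfl
  | cons j t ih =>
    intro tmp
    simp only [pvAInner]
    split
    · exact PySem.List.length_pySetD _ _ _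
    · exact ih tmp

lemma pvScan_fold (n m : Int) :
    ∀ (is : List Int), (∀ i ∈ is, 0 < i) → ∀ (tmp divs : List Int),
    (tmp.length : Int) = m → pvRel n tmp divs →
    pvRel n (is.foldl (fun t i => pvAInner i t (PySem.List.pyRange 0 m 1)) tmp)
            (is.foldl (fun d i => pvBInner n i d (PySem.List.pyRange 0 m 1)) divs) ∧
    ((is.foldl (fun t i => pvAInner i t (PySem.List.pyRange 0 m 1)) tmp).length : Int) = m := by
  intro is
  induction is with
  | nil => intro _ tmp divs hlen hrel; exact ⟨hrel, hlen⟩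
  | cons i t ih =>
    intro hpos tmp divs hlen hrel
    have hi : 0 < i := hpos i (List.mem_cons_self)
    have hmem : ∀ j ∈ PySem.List.pyRange 0 m 1, 0 ≤ j ∧ j < (tmp.length : Int) := by
      intro j hj
      rw [PySem.List.mem_pyRange_one] at hj
      omega
    have hstep := pvScan_step n i hi (PySem.List.pyRange 0 m 1) tmp divs hrel hmem
    simp only [List.foldl_cons]
    exact ih (fun x hx => hpos x (List.mem_cons_of_mem _ hx)) _ _
      (by rw [len_pvAInner]; exact hlen) hstep

-- index-fold of a pointwise-matching function equals the structural fold
lemma pvProd_index (F : Int → Int) : ∀ (xs : List Int) (s acc : Int),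
    (∀ k : Nat, (hk : k < xs.length) → F (s + k) = xs[k]) →
    (PySem.List.pyRange s (s + xs.length) 1).foldl (fun r j => r * F j) acc
      = xs.foldl (fun r v => r * v) acc := by
  intro xs
  induction xs with
  | nil =>
    intro s acc _
    rw [show s + ((List.length ([] : List Int) : Nat) : Int) = s by simp,
      PySem.List.pyRange_one_eq_nil le_rfl]
    rfl
  | cons x t ih =>
    intro s acc h
    have hlen : s + ((List.length (x :: t) : Nat) : Int) = (s + 1) + (t.length : Int) := by
      simp only [List.length_cons]
      push_cast
      ring
    rw [hlen, PySem.List.pyRange_one_cons (by omega)]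
    simp only [List.foldl_cons]
    have h0 : F s = x := by
      have := h 0 (by simp)
      simpa using this
    rw [h0]
    apply ih (s + 1) (acc * x)
    intro k hk
    have := h (k + 1) (by simpa using Nat.succ_lt_succ hk)
    rw [show s + ((k + 1 : Nat) : Int) = s + 1 + (k : Int) by push_cast; ring] at this
    simpa using this

-- the two binomial helpers agree everywhere
lemma binom_eq (a b : Int) : binomial_coefficients a b = pvBinomLike a b := by
  unfold binomial_coefficients pvBinomLike
  generalize (if a < 2 * b then a - b else b) = m
  by_cases hc : a = m ∨ m = 0
  · rw [if_pos hc, if_pos hc]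
  · rw [if_neg hc, if_neg hc]
    by_cases hm : 0 < m
    · have hlen0 : ((((PySem.List.pyRange 0 m 1).map (fun i => a - i)).length : Nat) : Int) = m := by
        rw [List.length_map, PySem.List.length_pyRange_one]
        omega
      have hrel0 : pvRel a ((PySem.List.pyRange 0 m 1).map (fun i => a - i))
          ((PySem.List.pyRange 0 m 1).map (fun _ => (1 : Int))) := by
        constructor
        · simp
        · intro k hk hk'
          simp only [List.length_map, PySem.List.length_pyRange_one] at hk hk'
          simp only [List.getElem_map, PySem.List.getElem_pyRange_one]
          constructor
          · ring_nf
          · norm_num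
      have hpos : ∀ i ∈ PySem.List.pyRange 1 (m + 1) 1, 0 < i := by
        intro i hi
        rw [PySem.List.mem_pyRange_one] at hi
        omega
      obtain ⟨⟨hlenF, hptF⟩, hlenA⟩ := pvScan_fold a m (PySem.List.pyRange 1 (m + 1) 1) hpos
        ((PySem.List.pyRange 0 m 1).map (fun i => a - i))
        ((PySem.List.pyRange 0 m 1).map (fun _ => (1 : Int))) hlen0 hrel0
      set tmpF := (PySem.List.pyRange 1 (m + 1) 1).foldl
        (fun t i => pvAInner i t (PySem.List.pyRange 0 m 1))
        ((PySem.List.pyRange 0 m 1).map (fun i => a - i)) with htmpF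
      set divsF := (PySem.List.pyRange 1 (m + 1) 1).foldl
        (fun d i => pvBInner a i d (PySem.List.pyRange 0 m 1))
        ((PySem.List.pyRange 0 m 1).map (fun _ => (1 : Int))) with hdivsF
      have hm' : m = 0 + ((tmpF.length : Nat) : Int) := by omega
      rw [show PySem.List.pyRange 0 m 1 = PySem.List.pyRange 0 (0 + ((tmpF.length : Nat) : Int)) 1
        by rw [← hm']]
      refine Eq.symm (pvProd_index
        (fun j => PySem.Int.floordiv (a - j) (PySem.List.pyGetD divsF j 0)) tmpF 0 1 ?_)
      intro k hk
      have hk' : k < divsF.length := by omega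
      have hget : PySem.List.pyGetD divsF (0 + (k : Int)) 0 = divsF[k] := by
        rw [show (0 : Int) + (k : Int) = ((k : Nat) : Int) by ring]
        exact PySem.List.pyGetD_eq_getElem divsF 0 (by omega) (by omega)
      obtain ⟨hprod, hdpos⟩ := hptF k hk hk'
      show PySem.Int.floordiv (a - (0 + (k : Int))) (PySem.List.pyGetD divsF (0 + (k : Int)) 0)
        = tmpF[k]
      rw [hget]
      rw [show a - (0 + (k : Int)) = tmpF[k] * divsF[k] by rw [hprod]; ring]
      rw [PySem.Int.floordiv_eq_ediv_of_pos hdpos, Int.mul_ediv_cancel _ (by omega)]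
    · rw [PySem.List.pyRange_one_eq_nil (show m + 1 ≤ 1 by omega),
        PySem.List.pyRange_one_eq_nil (show m ≤ 0 by omega)]
      rfl

lemma binom_zero (i : Int) (hi : 1 ≤ i) : binomial_coefficients (i + 1) 0 = 1 := by
  unfold binomial_coefficients
  rw [if_neg (show ¬((i : Int) + 1 < 2 * 0) by omega)]
  rw [if_pos (Or.inr rfl)]

-- the helper's symmetry reduction: its value depends only on min(b, n - b)
lemma binom_min (n j : Int) : binomial_coefficients n j = pvBinomLike n (min j (n - j)) := by
  rw [binom_eq]
  unfold pvBinomLike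
  have hm : (if n < 2 * j then n - j else j)
      = (if n < 2 * (min j (n - j)) then n - (min j (n - j)) else (min j (n - j))) := by
    split_ifs <;> omega
  rw [← hm]

-- cross-multiplication invariant between A's reduced pair and the exact pair
def pvInv (pA pB : Int × Int) : Prop :=
  0 < pA.2 ∧ 0 < pB.2 ∧ pA.1 * pB.2 = pB.1 * pA.2

-- canonical form (n/gcd, d/gcd) is determined by the rational value, for positive denominators
lemma canon_unique {n1 d1 n2 d2 : Int} (h1 : 0 < d1) (h2 : 0 < d2)
    (h : n1 * d2 = n2 * d1) :
    (PySem.Int.floordiv n1 (Int.gcd n1 d1), PySem.Int.floordiv d1 (Int.gcd n1 d1))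
      = (PySem.Int.floordiv n2 (Int.gcd n2 d2), PySem.Int.floordiv d2 (Int.gcd n2 d2)) := by
  have hq : Rat.divInt n1 d1 = Rat.divInt n2 d2 :=
    (Rat.divInt_eq_divInt_iff (by omega) (by omega)).mpr h
  have hnum1 : PySem.Int.floordiv n1 (Int.gcd n1 d1) = (Rat.divInt n1 d1).num := by
    rw [PySem.Int.floordiv_eq_ediv_of_pos (gcd_cast_pos h1), Rat.num_divInt,
      Int.sign_eq_one_of_pos h1, one_mul, Int.gcd_comm d1 n1]
  have hnum2 : PySem.Int.floordiv n2 (Int.gcd n2 d2) = (Rat.divInt n2 d2).num := by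
    rw [PySem.Int.floordiv_eq_ediv_of_pos (gcd_cast_pos h2), Rat.num_divInt,
      Int.sign_eq_one_of_pos h2, one_mul, Int.gcd_comm d2 n2]
  have hden1 : PySem.Int.floordiv d1 (Int.gcd n1 d1) = ((Rat.divInt n1 d1).den : Int) := by
    have h' : ((Rat.divInt n1 d1).den : Int) = ((d1.natAbs / Int.gcd d1 n1 : Nat) : Int) := by
      rw [Rat.den_divInt, if_neg (by omega)]
    rw [h', Int.gcd_comm d1 n1, Int.natCast_div, Int.natAbs_of_nonneg (le_of_lt h1),
      PySem.Int.floordiv_eq_ediv_of_pos (gcd_cast_pos h1)]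
  have hden2 : PySem.Int.floordiv d2 (Int.gcd n2 d2) = ((Rat.divInt n2 d2).den : Int) := by
    have h' : ((Rat.divInt n2 d2).den : Int) = ((d2.natAbs / Int.gcd d2 n2 : Nat) : Int) := by
      rw [Rat.den_divInt, if_neg (by omega)]
    rw [h', Int.gcd_comm d2 n2, Int.natCast_div, Int.natAbs_of_nonneg (le_of_lt h2),
      PySem.Int.floordiv_eq_ediv_of_pos (gcd_cast_pos h2)]
  rw [hnum1, hnum2, hden1, hden2, hq]

-- one A-step preserves the invariant against the exact (no-reduction) step
lemma pvInv_stepE {na da sn sd : Int} (bn bd c : Int) (hbd : 0 < bd)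
    (h : pvInv (na, da) (sn, sd)) :
    pvInv
      (if na * bd + da * bn * c ≠ 0 then
         (PySem.Int.floordiv (na * bd + da * bn * c) (Int.gcd (na * bd + da * bn * c) (da * bd)),
          PySem.Int.floordiv (da * bd) (Int.gcd (na * bd + da * bn * c) (da * bd)))
       else (na * bd + da * bn * c, da * bd))
      (sn * bd + sd * bn * c, sd * bd) := by
  obtain ⟨hda, hsd, hcross⟩ := h
  replace hda : 0 < da := hda
  replace hsd : 0 < sd := hsd
  replace hcross : na * sd = sn * da := hcross
  have hden : 0 < da * bd := mul_pos hda hbd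
  have hden' : 0 < sd * bd := mul_pos hsd hbd
  have hcross' : (na * bd + da * bn * c) * (sd * bd) = (sn * bd + sd * bn * c) * (da * bd) := by
    linear_combination (bd * bd) * hcross
  by_cases hz : na * bd + da * bn * c ≠ 0
  · rw [if_pos hz]
    have hG : (0 : Int) < (Int.gcd (na * bd + da * bn * c) (da * bd) : Int) := gcd_cast_pos hden
    have hdvn := floordiv_exact hG (Int.gcd_dvd_left (na * bd + da * bn * c) (da * bd))
    have hdvdd := floordiv_exact hG (Int.gcd_dvd_right (na * bd + da * bn * c) (da * bd))
    refine ⟨canon_den_pos hden, hden', ?_⟩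
    show PySem.Int.floordiv (na * bd + da * bn * c) (Int.gcd (na * bd + da * bn * c) (da * bd)) *
        (sd * bd)
      = (sn * bd + sd * bn * c) *
        PySem.Int.floordiv (da * bd) (Int.gcd (na * bd + da * bn * c) (da * bd))
    apply Int.eq_of_mul_eq_mul_right
      (show ((Int.gcd (na * bd + da * bn * c) (da * bd) : Nat) : Int) ≠ 0 by omega)
    calc PySem.Int.floordiv (na * bd + da * bn * c) (Int.gcd (na * bd + da * bn * c) (da * bd)) *
          (sd * bd) * ((Int.gcd (na * bd + da * bn * c) (da * bd) : Nat) : Int)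
        = (PySem.Int.floordiv (na * bd + da * bn * c) (Int.gcd (na * bd + da * bn * c) (da * bd)) *
            ((Int.gcd (na * bd + da * bn * c) (da * bd) : Nat) : Int)) * (sd * bd) := by ring
      _ = (na * bd + da * bn * c) * (sd * bd) := by rw [hdvn]
      _ = (sn * bd + sd * bn * c) * (da * bd) := hcross'
      _ = (sn * bd + sd * bn * c) *
            (PySem.Int.floordiv (da * bd) (Int.gcd (na * bd + da * bn * c) (da * bd)) *
              ((Int.gcd (na * bd + da * bn * c) (da * bd) : Nat) : Int)) := by rw [hdvdd]
      _ = (sn * bd + sd * bn * c) *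
            PySem.Int.floordiv (da * bd) (Int.gcd (na * bd + da * bn * c) (da * bd)) *
            ((Int.gcd (na * bd + da * bn * c) (da * bd) : Nat) : Int) := by ring
  · rw [if_neg hz]
    exact ⟨hden, hden', hcross'⟩

-- ---- the common-denominator decomposition of the exact sum ----
def pvP (bd : Int → Int) : List Int → Int
  | [] => 1
  | j :: js => bd j * pvP bd js

def pvW (c bn bd : Int → Int) : List Int → Int
  | [] => 0
  | j :: js => c j * bn j * pvP bd js + bd j * pvW c bn bd js

lemma pvW_congr_c (c1 c2 bn bd : Int → Int) :
    ∀ js, (∀ j ∈ js, c1 j = c2 j) → pvW c1 bn bd js = pvW c2 bn bd js := by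
  intro js
  induction js with
  | nil => intro _; rfl
  | cons j t ih =>
    intro h
    simp only [pvW, h j (List.mem_cons_self),
      ih (fun x hx => h x (List.mem_cons_of_mem _ hx))]

-- res shape: every looked-up row is a pair with positive denominator
lemma pvShape (res : List (List Int)) (hres : ∀ l ∈ res, ∃ a b, l = [a, b] ∧ 0 < b)
    (j : Int) (h0 : 0 ≤ j) (hlt : j < (res.length : Int)) :
    PySem.List.pyGetD res j [] = [pvBN res j, pvBD res j] ∧ 0 < pvBD res j := by
  have hget : PySem.List.pyGetD res j [] = res[j.toNat] :=
    PySem.List.pyGetD_eq_getElem res [] h0 hlt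
  obtain ⟨a, b, hpair, hb⟩ := hres res[j.toNat] (List.getElem_mem _)
  unfold pvBN pvBD
  rw [hget, hpair]
  exact ⟨rfl, hb⟩

-- A's reduced fold cross-equals the common-denominator pair
lemma pvFold_A (res : List (List Int)) (i : Int)
    (hres : ∀ l ∈ res, ∃ a b, l = [a, b] ∧ 0 < b) :
    ∀ (js : List Int), (∀ j ∈ js, 0 ≤ j ∧ j < (res.length : Int)) →
    ∀ (pA : Int × Int) (sn sd : Int), pvInv pA (sn, sd) →
    pvInv (js.foldl (pvAIn res i) pA)
      (sn * pvP (pvBD res) js +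
         sd * pvW (fun j => binomial_coefficients (i + 1) j) (pvBN res) (pvBD res) js,
       sd * pvP (pvBD res) js) := by
  intro js
  induction js with
  | nil =>
    intro _ pA sn sd h
    simpa [pvP, pvW] using h
  | cons j t ih =>
    intro hmem pA sn sd h
    obtain ⟨hj0, hjlt⟩ := hmem j (List.mem_cons_self)
    obtain ⟨hpair, hbd⟩ := pvShape res hres j hj0 hjlt
    have hA : pvAIn res i pA j =
        (if pA.1 * pvBD res j + pA.2 * pvBN res j * binomial_coefficients (i + 1) j ≠ 0 then
           (PySem.Int.floordiv (pA.1 * pvBD res j + pA.2 * pvBN res j * binomial_coefficients (i + 1) j)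
              (Int.gcd (pA.1 * pvBD res j + pA.2 * pvBN res j * binomial_coefficients (i + 1) j)
                (pA.2 * pvBD res j)),
            PySem.Int.floordiv (pA.2 * pvBD res j)
              (Int.gcd (pA.1 * pvBD res j + pA.2 * pvBN res j * binomial_coefficients (i + 1) j)
                (pA.2 * pvBD res j)))
         else (pA.1 * pvBD res j + pA.2 * pvBN res j * binomial_coefficients (i + 1) j,
               pA.2 * pvBD res j)) := by
      simp only [pvAIn, hpair, pyGetD_pair_zero, pyGetD_pair_one]
    obtain ⟨p1, p2⟩ := pA
    have hstep := pvInv_stepE (na := p1) (da := p2) (sn := sn) (sd := sd)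
      (pvBN res j) (pvBD res j) (binomial_coefficients (i + 1) j) hbd h
    simp only [List.foldl_cons, hA]
    have hrec := ih (fun x hx => hmem x (List.mem_cons_of_mem _ hx)) _
      (sn * pvBD res j + sd * pvBN res j * binomial_coefficients (i + 1) j)
      (sd * pvBD res j) hstep
    have hpairs :
        ((sn * pvBD res j + sd * pvBN res j * binomial_coefficients (i + 1) j) * pvP (pvBD res) t +
           sd * pvBD res j * pvW (fun j => binomial_coefficients (i + 1) j) (pvBN res) (pvBD res) t,
         sd * pvBD res j * pvP (pvBD res) t)
        = (sn * pvP (pvBD res) (j :: t) +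
             sd * pvW (fun j => binomial_coefficients (i + 1) j) (pvBN res) (pvBD res) (j :: t),
           sd * pvP (pvBD res) (j :: t)) := by
      simp only [pvP, pvW, Prod.mk.injEq]
      constructor <;> ring
    rw [← hpairs]
    exact hrec

-- B's sum over the fixed common denominator D
lemma pvFold_B (c bn bd : Int → Int) (D : Int) :
    ∀ (js : List Int) (Q acc : Int), 0 < Q → (∀ j ∈ js, 0 < bd j) →
    D = pvP bd js * Q →
    js.foldl (fun a j => a + c j * bn j * PySem.Int.floordiv D (bd j)) acc
      = acc + pvW c bn bd js * Q := by
  intro js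
  induction js with
  | nil => intro Q acc _ _ _; simp [pvW]
  | cons j t ih =>
    intro Q acc hQ hbd hD
    have hbj : 0 < bd j := hbd j (List.mem_cons_self)
    have hPt : D = pvP bd t * (bd j * Q) := by
      rw [hD]; simp only [pvP]; ring
    have hfd : PySem.Int.floordiv D (bd j) = pvP bd t * Q := by
      rw [hD]
      simp only [pvP]
      rw [PySem.Int.floordiv_eq_ediv_of_pos hbj, mul_assoc,
        Int.mul_ediv_cancel_left _ (by omega)]
    simp only [List.foldl_cons, hfd]
    rw [ih (bd j * Q) _ (by positivity) (fun x hx => hbd x (List.mem_cons_of_mem _ hx)) hPt]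
    simp only [pvW]
    ring

lemma pvFold_P (bd : Int → Int) : ∀ (js : List Int) (acc : Int),
    js.foldl (fun p j => p * bd j) acc = acc * pvP bd js := by
  intro js
  induction js with
  | nil => intro acc; simp [pvP]
  | cons j t ih =>
    intro acc
    simp only [List.foldl_cons, pvP, ih]
    ring

-- the final normalizations agree on invariant-linked pairs
lemma pvFinish_eq (i : Int) (pA pB : Int × Int) (hi : 1 ≤ i) (hinv : pvInv pA pB) :
    pvAFinish i pA = pvBFinish i pB ∧ ∃ n d, 0 < d ∧ pvAFinish i pA = [n, d] := by
  obtain ⟨a1, a2⟩ := pA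
  obtain ⟨b1, b2⟩ := pB
  obtain ⟨ha2, hb2, hcross⟩ := hinv
  replace ha2 : 0 < a2 := ha2
  replace hb2 : 0 < b2 := hb2
  replace hcross : a1 * b2 = b1 * a2 := hcross
  have hd1 : 0 < a2 * (i + 1) := mul_pos ha2 (by omega)
  have hd2 : 0 < b2 * (i + 1) := mul_pos hb2 (by omega)
  have hsign : ¬((a1 * (-1) < 0 ∧ a2 * (i + 1) < 0) ∨ (a1 * (-1) > 0 ∧ a2 * (i + 1) < 0)) := by
    rintro (⟨_, hcon⟩ | ⟨_, hcon⟩) <;> linarith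
  have hq : pvASign i (a1, a2) = (a1 * (-1), a2 * (i + 1)) := by
    simp only [pvASign]
    rw [if_neg hsign]
  have hAun : pvAFinish i (a1, a2) =
      (if a1 * (-1) = 0 then [a1 * (-1), 1]
       else [PySem.Int.floordiv (a1 * (-1)) (Int.gcd |a1 * (-1)| |a2 * (i + 1)|),
             PySem.Int.floordiv (a2 * (i + 1)) (Int.gcd |a1 * (-1)| |a2 * (i + 1)|)]) := by
    rw [pvAFinish, hq]
    simp only [pvAFinish2]
  have habs : Int.gcd |a1 * (-1)| |a2 * (i + 1)| = Int.gcd (a1 * (-1)) (a2 * (i + 1)) := by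
    rw [Int.gcd_eq_natAbs_gcd_natAbs, Int.gcd_eq_natAbs_gcd_natAbs,
      Int.natAbs_abs, Int.natAbs_abs]
  have hBun : pvBFinish i (b1, b2) =
      [PySem.Int.floordiv (-b1) (Int.gcd (-b1) (b2 * (i + 1))),
       PySem.Int.floordiv (b2 * (i + 1)) (Int.gcd (-b1) (b2 * (i + 1)))] := rfl
  have hmain : pvAFinish i (a1, a2) = pvBFinish i (b1, b2) := by
    rw [hAun, hBun]
    by_cases hz : a1 * (-1) = 0
    · rw [if_pos hz]
      have ha0 : a1 = 0 := by omega
      have hb0 : b1 = 0 := by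
        have h0 : b1 * a2 = 0 := by rw [← hcross, ha0]; ring
        rcases mul_eq_zero.mp h0 with h' | h'
        · exact h'
        · omega
      rw [hz, hb0, neg_zero]
      have hgg : ((Int.gcd (0 : Int) (b2 * (i + 1)) : Nat) : Int) = b2 * (i + 1) := by
        simp only [Int.zero_gcd]
        exact Int.natAbs_of_nonneg (by omega)
      rw [hgg, PySem.Int.floordiv_eq_ediv_of_pos hd2,
        PySem.Int.floordiv_eq_ediv_of_pos hd2, Int.zero_ediv, Int.ediv_self (by omega)]
    · rw [if_neg hz, habs]
      have hz2 : -b1 ≠ 0 := by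
        intro hb0
        apply hz
        have : b1 = 0 := by omega
        have h0 : a1 * b2 = 0 := by rw [hcross, this]; ring
        rcases mul_eq_zero.mp h0 with h' | h'
        · omega
        · omega
      have hcross2 : (a1 * (-1)) * (b2 * (i + 1)) = (-b1) * (a2 * (i + 1)) := by
        linear_combination (-(i + 1)) * hcross
      have hpair := canon_unique hd1 hd2 hcross2
      rw [Prod.mk.injEq] at hpair
      rw [hpair.1, hpair.2]
  refine ⟨hmain, ?_⟩
  rw [hAun]
  by_cases hz : a1 * (-1) = 0
  · rw [if_pos hz]
    exact ⟨a1 * (-1), 1, one_pos, rfl⟩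
  · rw [if_neg hz]
    refine ⟨_, _, ?_, rfl⟩
    rw [habs]
    exact canon_den_pos hd1

-- shape invariant on the result list
def pvGood (res : List (List Int)) : Prop :=
  res.head? = some [1, 1] ∧ ∀ l ∈ res, ∃ n d, l = [n, d] ∧ 0 < d

lemma pvStep_eq (res : List (List Int)) (i : Int) (hi : 1 ≤ i)
    (hg : pvGood res) (hlen : ((res.length : Int)) = i) :
    pvAStep res i = pvBStep res i ∧ ∃ n d, 0 < d ∧ pvAStep res i = res ++ [[n, d]] := by
  obtain ⟨hhead, hshape⟩ := hg
  obtain ⟨t, ht⟩ : ∃ t, res = [1, 1] :: t := by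
    cases res with
    | nil => simp at hhead
    | cons x xs =>
      refine ⟨xs, ?_⟩
      simp only [List.head?_cons, Option.some.injEq] at hhead
      rw [hhead]
  have hget0 : PySem.List.pyGetD res 0 [] = [1, 1] := by
    rw [ht]; exact PySem.List.pyGetD_zero_cons _ _ _
  have hbn0 : pvBN res 0 = 1 := by unfold pvBN; rw [hget0]; rfl
  have hbd0 : pvBD res 0 = 1 := by unfold pvBD; rw [hget0]; rfl
  have hmem : ∀ j ∈ PySem.List.pyRange 1 i 1, 0 ≤ j ∧ j < ((res.length : Nat) : Int) := by
    intro j hj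
    rw [PySem.List.mem_pyRange_one] at hj
    constructor
    · omega
    · rw [hlen]; omega
  have hInv : pvInv ((PySem.List.pyRange 1 i 1).foldl (pvAIn res i) (1, 1))
      (pvP (pvBD res) (PySem.List.pyRange 1 i 1) +
         pvW (fun j => binomial_coefficients (i + 1) j) (pvBN res) (pvBD res)
           (PySem.List.pyRange 1 i 1),
       pvP (pvBD res) (PySem.List.pyRange 1 i 1)) := by
    have h := pvFold_A res i hshape _ hmem (1, 1) 1 1 ⟨one_pos, one_pos, by ring⟩
    simpa using h
  have hstartA : ((PySem.List.pyGetD (PySem.List.pyGetD res 0 []) 0 0) *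
      binomial_coefficients (i + 1) 0,
      PySem.List.pyGetD (PySem.List.pyGetD res 0 []) 1 0) = ((1 : Int), (1 : Int)) := by
    rw [hget0, binom_zero i hi, pyGetD_pair_zero, pyGetD_pair_one]
    norm_num
  have hAeq : pvAStep res i =
      res ++ [pvAFinish i ((PySem.List.pyRange 1 i 1).foldl (pvAIn res i) (1, 1))] := by
    unfold pvAStep
    rw [hstartA]
  have hrange0 : PySem.List.pyRange 0 i 1 = 0 :: PySem.List.pyRange 1 i 1 :=
    PySem.List.pyRange_one_cons (by omega)
  have hbdpos : ∀ j ∈ PySem.List.pyRange 0 i 1, 0 < pvBD res j := by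
    intro j hj
    rw [PySem.List.mem_pyRange_one] at hj
    exact (pvShape res hshape j (by omega) (by rw [hlen]; omega)).2
  have hD : (PySem.List.pyRange 0 i 1).foldl (fun p j => p * pvBD res j) 1
      = pvP (pvBD res) (PySem.List.pyRange 1 i 1) := by
    rw [pvFold_P, hrange0]
    simp only [pvP, hbd0, one_mul]
  have hBeq : pvBStep res i =
      res ++ [pvBFinish i
        ((PySem.List.pyRange 0 i 1).foldl
          (fun a j => a + PySem.List.pyGetD
              ((PySem.List.pyRange 0 (PySem.Int.floordiv (i + 1) 2 + 1) 1).map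
                (fun k => pvBinomLike (i + 1) k)) (min j (i + 1 - j)) 0 * pvBN res j *
            PySem.Int.floordiv
              ((PySem.List.pyRange 0 i 1).foldl (fun p j => p * pvBD res j) 1)
              (pvBD res j)) 0,
         (PySem.List.pyRange 0 i 1).foldl (fun p j => p * pvBD res j) 1)] := rfl
  rw [hD] at hBeq
  have hcongr : ∀ j ∈ PySem.List.pyRange 0 i 1,
      PySem.List.pyGetD
        ((PySem.List.pyRange 0 (PySem.Int.floordiv (i + 1) 2 + 1) 1).map
          (fun k => pvBinomLike (i + 1) k)) (min j (i + 1 - j)) 0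
      = binomial_coefficients (i + 1) j := by
    intro j hj
    rw [PySem.List.mem_pyRange_one] at hj
    have h2 : PySem.Int.floordiv (i + 1) 2 = (i + 1) / 2 :=
      PySem.Int.floordiv_eq_ediv_of_pos (by omega)
    rw [PySem.List.pyGetD_map_pyRange_of_nonneg _ _ _ _ (by omega) (by rw [h2]; omega),
      ← binom_min]
  have hs : (PySem.List.pyRange 0 i 1).foldl
      (fun a j => a + PySem.List.pyGetD
          ((PySem.List.pyRange 0 (PySem.Int.floordiv (i + 1) 2 + 1) 1).map
            (fun k => pvBinomLike (i + 1) k)) (min j (i + 1 - j)) 0 * pvBN res j *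
        PySem.Int.floordiv (pvP (pvBD res) (PySem.List.pyRange 1 i 1)) (pvBD res j)) 0
      = pvP (pvBD res) (PySem.List.pyRange 1 i 1) +
        pvW (fun j => binomial_coefficients (i + 1) j) (pvBN res) (pvBD res)
          (PySem.List.pyRange 1 i 1) := by
    have hDhyp : pvP (pvBD res) (PySem.List.pyRange 1 i 1)
        = pvP (pvBD res) (PySem.List.pyRange 0 i 1) * 1 := by
      rw [hrange0]
      simp only [pvP, hbd0, one_mul, mul_one]
    have h := pvFold_B
      (fun j => PySem.List.pyGetD
        ((PySem.List.pyRange 0 (PySem.Int.floordiv (i + 1) 2 + 1) 1).map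
          (fun k => pvBinomLike (i + 1) k)) (min j (i + 1 - j)) 0)
      (pvBN res) (pvBD res)
      (pvP (pvBD res) (PySem.List.pyRange 1 i 1)) (PySem.List.pyRange 0 i 1)
      1 0 one_pos hbdpos hDhyp
    rw [h, pvW_congr_c _ (fun j => binomial_coefficients (i + 1) j) (pvBN res) (pvBD res)
      (PySem.List.pyRange 0 i 1) hcongr, hrange0]
    simp only [pvW, hbn0, hbd0, binom_zero i hi]
    ring
  rw [hs] at hBeq
  obtain ⟨hfin, n, d, hd, hform⟩ := pvFinish_eq i _ _ hi hInv
  constructor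
  · rw [hAeq, hBeq, hfin]
  · exact ⟨n, d, hd, by rw [hAeq, hform]⟩

lemma pvOuter : ∀ (fuel : Nat) (b k : Int) (res : List (List Int)),
    (b - k).toNat ≤ fuel → 1 ≤ k → pvGood res → ((res.length : Int)) = k →
    (PySem.List.pyRange k b 1).foldl pvAStep res = (PySem.List.pyRange k b 1).foldl pvBStep res := by
  intro fuel
  induction fuel with
  | zero =>
    intro b k res hf hk _ _
    rw [PySem.List.pyRange_one_eq_nil (by omega)]
    rfl
  | succ n ih =>
    intro b k res hf hk hgood hlen
    by_cases hkb : k < b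
    · rw [PySem.List.pyRange_one_cons hkb]
      simp only [List.foldl_cons]
      obtain ⟨heq, nn, dd, hdd, happ⟩ := pvStep_eq res k hk hgood hlen
      rw [← heq]
      apply ih
      · omega
      · omega
      · rw [happ]
        obtain ⟨hhead, hshape⟩ := hgood
        constructor
        · cases res with
          | nil => simp at hhead
          | cons x xs => simpa using hhead
        · intro l hl
          rcases List.mem_append.mp hl with h | h
          · exact hshape l h
          · refine ⟨nn, dd, ?_, hdd⟩
            simpa using h
      · rw [happ]
        simp only [List.length_append, List.length_cons, List.length_nil]
        push_cast
        omega
    · rw [PySem.List.pyRange_one_eq_nil (by omega)]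
      rfl

-- ===== VERDICT (by name: the statement is the Claim_ definition above) =====
theorem bernoulli_q_spec : Claim_equal_bernoulli_q := by
  intro num _
  show bernoulli_q num = bernoulli_q_alt num
  unfold bernoulli_q bernoulli_q_alt
  apply pvOuter (num + 1 - 1).toNat (num + 1) 1 [[1, 1]] (by omega) le_rfl
  · constructor
    · rfl
    · intro l hl
      refine ⟨1, 1, ?_, one_pos⟩
      simpa using hl
  · simp
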